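-- pv_equiv track=rewrite | github.com/SWeszler/google-kickstart | 2020_G/G3/g3pp2.py | solution_bf
-- ===== SOURCE A (Python) =====
-- def solution_bf(W, N, nums):
--     m = float("inf")
--
--     for x in range(1, N + 1):
--         count = 0
--         for n in nums:
--             count += min(abs(x - n), N - x + n, N - n + x)
--         m = min(m, count)
--
--     return m
-- ===== SOURCE B (Python) =====
-- def solution_bf(W, N, nums):
--     # Sort once and keep prefix sums; for each candidate position x the cost
--     # function is piecewise linear in n with breakpoints x - N//2, x, x + N//2,
--     # so each region's total is a count times a constant plus/minus a range sum,
--     # found by binary search instead of scanning all of nums.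
--     ys = sorted(nums)
--     M = len(ys)
--     pref = [0]
--     for v in ys:
--         pref.append(pref[-1] + v)
--
--     def first_at_least(t):
--         lo, hi = 0, M
--         while lo < hi:
--             mid = (lo + hi) // 2
--             if ys[mid] < t:
--                 lo = mid + 1
--             else:
--                 hi = mid
--         return lo
--
--     h = N // 2
--     best = None
--     for x in range(1, N + 1):
--         i = first_at_least(x - h)
--         j = first_at_least(x + 1)
--         k = first_at_least(x + h + 1)
--         cost = (N - x) * i + pref[i]                     # n < x-h:        N - x + n
--         cost += x * (j - i) - (pref[j] - pref[i])        # x-h <= n <= x:  x - n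
--         cost += (pref[k] - pref[j]) - x * (k - j)        # x < n <= x+h:   n - x
--         cost += (N + x) * (M - k) - (pref[M] - pref[k])  # n > x+h:        N + x - n
--         if best is None or cost < best:
--             best = cost
--     return best
-- ===== Notes on version B (the rewrite author's own statement) =====
-- stated objective: faster
-- what changed: B sorts nums once, builds prefix sums, and computes each position's total circular distance from three binary searches over the sorted list instead of scanning all of nums for every position; Pre_ excludes N < 1, where A returns float('inf') (not an int) and B returns None.
-- outside the precondition, e.g. on solution_bf(1, 0, [3]): A returns inf, B returns None
import Mathlib
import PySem

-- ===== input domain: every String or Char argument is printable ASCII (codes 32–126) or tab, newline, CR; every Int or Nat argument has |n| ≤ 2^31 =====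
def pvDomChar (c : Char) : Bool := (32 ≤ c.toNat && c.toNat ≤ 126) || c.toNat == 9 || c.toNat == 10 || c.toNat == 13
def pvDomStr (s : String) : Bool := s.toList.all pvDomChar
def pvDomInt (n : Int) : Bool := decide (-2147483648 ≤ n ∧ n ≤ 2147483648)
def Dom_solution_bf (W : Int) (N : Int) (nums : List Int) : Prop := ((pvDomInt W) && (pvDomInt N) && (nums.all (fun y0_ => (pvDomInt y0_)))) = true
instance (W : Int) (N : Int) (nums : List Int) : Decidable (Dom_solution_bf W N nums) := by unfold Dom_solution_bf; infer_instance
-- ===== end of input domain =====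

-- B sorts nums once and evaluates each position's cost from prefix sums and
-- three binary searches instead of scanning all of nums, an asymptotic change.

-- ===== PORT A =====
def solution_bf (W : Int) (N : Int) (nums : List Int) : Int :=
  ((PySem.List.pyRange 1 (N + 1) 1).foldl
    (fun (m : Option Int) (x : Int) =>
      let count := nums.foldl (fun c n => c + min (min |x - n| (N - x + n)) (N - n + x)) 0
      some (match m with
            | none => count          -- min(float('inf'), count) = count
            | some v => min v count))
    none).getD 0                     -- getD 0 is never reached under Pre_ (N ≥ 1)

-- ===== PORT B =====
-- Source B's 'first_at_least' while-loop; ys[mid] is always in range (lo < hi ≤ len ys)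
def pvBlLoop (ys : List Int) (t : Int) (lo hi : Nat) : Nat :=
  if _h : lo < hi then
    let mid := (lo + hi) / 2
    if ys.getD mid 0 < t then pvBlLoop ys t (mid + 1) hi else pvBlLoop ys t lo mid
  else lo
termination_by hi - lo
decreasing_by all_goals omega

-- Source B's prefix-sum list; pref[-1] is getLastD 0 (the list is never empty)
def pvPref (ys : List Int) : List Int :=
  ys.foldl (fun p v => p ++ [p.getLastD 0 + v]) [0]

def solution_bf_alt (W : Int) (N : Int) (nums : List Int) : Int :=
  let ys := PySem.List.sorted nums (fun n => n) false
  let M := ys.length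
  let pref := pvPref ys
  let h := PySem.Int.floordiv N 2
  (((PySem.List.pyRange 1 (N + 1) 1).foldl
    (fun (best : Option Int) (x : Int) =>
      let i := pvBlLoop ys (x - h) 0 M
      let j := pvBlLoop ys (x + 1) 0 M
      let k := pvBlLoop ys (x + h + 1) 0 M
      let cost := (N - x) * (i : Int) + pref.getD i 0
      let cost := cost + (x * ((j : Int) - (i : Int)) - (pref.getD j 0 - pref.getD i 0))
      let cost := cost + ((pref.getD k 0 - pref.getD j 0) - x * ((k : Int) - (j : Int)))
      let cost := cost + ((N + x) * ((M : Int) - (k : Int)) - (pref.getD M 0 - pref.getD k 0))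
      match best with
      | none => some cost
      | some b => if cost < b then some cost else some b)
    none).getD 0)                    -- Python's best is None only when N < 1, outside Pre_

-- ===== PRECONDITION & SPEC =====
-- Pre_ excludes N < 1, where A's loop never runs and A returns float('inf'),
-- a float rather than an int of the declared return type (B returns None there).
def Pre_solution_bf (W : Int) (N : Int) (nums : List Int) : Prop := 1 ≤ N
instance (W : Int) (N : Int) (nums : List Int) : Decidable (Pre_solution_bf W N nums) := by unfold Pre_solution_bf; infer_instance
def pvWitness_solution_bf : Int × Int × List Int := (0, 3, [1, 5, -2])

def Spec_solution_bf (W : Int) (N : Int) (nums : List Int) (out : Int) : Prop := out = solution_bf_alt W N nums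
instance (W : Int) (N : Int) (nums : List Int) (out : Int) : Decidable (Spec_solution_bf W N nums out) := by unfold Spec_solution_bf; infer_instance

-- ===== CLAIM =====
def Claim_equal_solution_bf : Prop := ∀ (W : Int) (N : Int) (nums : List Int), Dom_solution_bf W N nums → Pre_solution_bf W N nums → Spec_solution_bf W N nums (solution_bf W N nums)

-- ===== LEMMAS AND PROOFS =====

theorem pvBlLoop_spec (ys : List Int) (t : Int)
    (mono : ∀ p q : Nat, p ≤ q → q < ys.length → ys.getD p 0 ≤ ys.getD q 0) :
    ∀ lo hi : Nat, lo ≤ hi → hi ≤ ys.length →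
    (∀ j, j < lo → ys.getD j 0 < t) →
    (∀ j, hi ≤ j → j < ys.length → t ≤ ys.getD j 0) →
    pvBlLoop ys t lo hi ≤ ys.length ∧
      (∀ j, j < pvBlLoop ys t lo hi → ys.getD j 0 < t) ∧
      (∀ j, pvBlLoop ys t lo hi ≤ j → j < ys.length → t ≤ ys.getD j 0) := by
  intro lo hi
  induction lo, hi using pvBlLoop.induct ys t with
  | case1 lo hi hlt mid hmid ih =>
      intro _ h2 h3 h4
      rw [pvBlLoop, dif_pos hlt, if_pos (by exact hmid)]
      refine ih (by omega) h2 ?_ h4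
      intro j hj
      have hmlt : mid < ys.length := by omega
      exact lt_of_le_of_lt (mono j mid (by omega) hmlt) hmid
  | case2 lo hi hlt mid hmid ih =>
      intro h1 h2 h3 h4
      rw [pvBlLoop, dif_pos hlt, if_neg (by exact hmid)]
      refine ih (by omega) (by omega) h3 ?_
      intro j hj hjl
      have : ys.getD mid 0 ≤ ys.getD j 0 := mono mid j hj hjl
      omega
  | case3 lo hi hlt =>
      intro h1 h2 h3 h4
      rw [pvBlLoop, dif_neg hlt]
      exact ⟨by omega, h3, fun j hj hjl => h4 j (by omega) hjl⟩

theorem pvFilterEqTake (ys : List Int) (p : Int → Bool) (r : Nat) (hr : r ≤ ys.length)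
    (h3 : ∀ j, j < r → p (ys.getD j 0))
    (h4 : ∀ j, r ≤ j → j < ys.length → ¬ p (ys.getD j 0)) :
    ys.filter p = ys.take r := by
  conv_lhs => rw [← List.take_append_drop r ys, List.filter_append]
  have ht : (ys.take r).filter p = ys.take r := by
    apply List.filter_eq_self.mpr
    intro a ha
    obtain ⟨j, hj, rfl⟩ := List.mem_iff_getElem.mp ha
    have hjr : j < r := by have := List.length_take (i := r) (l := ys); omega
    have hjl : j < ys.length := by omega
    have := h3 j hjr
    rwa [List.getD_eq_getElem ys 0 hjl, ← List.getElem_take (xs := ys)] at this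
  have hd : (ys.drop r).filter p = [] := by
    apply List.filter_eq_nil_iff.mpr
    intro a ha
    obtain ⟨j, hj, rfl⟩ := List.mem_iff_getElem.mp ha
    have hjl : r + j < ys.length := by
      have := List.length_drop (l := ys) (i := r); omega
    have := h4 (r + j) (by omega) hjl
    rwa [List.getD_eq_getElem ys 0 hjl, ← List.getElem_drop (xs := ys)] at this
  rw [ht, hd, List.append_nil]

def pvScan (s : Int) : List Int → List Int
  | [] => []
  | y :: ys => (s + y) :: pvScan (s + y) ys

theorem pvFoldlPref (ys : List Int) : ∀ acc : List Int, acc ≠ [] →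
    ys.foldl (fun p v => p ++ [p.getLastD 0 + v]) acc = acc ++ pvScan (acc.getLastD 0) ys := by
  induction ys with
  | nil => intro acc _; simp [pvScan]
  | cons y ys ih =>
      intro acc hne
      simp only [List.foldl_cons, pvScan]
      rw [ih (acc ++ [acc.getLastD 0 + y]) (by simp)]
      rw [List.getLastD_concat]
      simp

theorem pvScan_getD (ys : List Int) : ∀ (s : Int) (i : Nat), i < ys.length →
    (pvScan s ys).getD i 0 = s + (ys.take (i + 1)).sum := by
  induction ys with
  | nil => intro s i h; simp at h
  | cons y ys ih =>
      intro s i h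
      cases i with
      | zero => simp [pvScan]
      | succ j =>
          simp only [pvScan, List.getD_cons_succ, List.take_succ_cons, List.sum_cons]
          rw [ih (s + y) j (by simpa using h)]
          ring

theorem pvPref_getD (ys : List Int) (i : Nat) (hi : i ≤ ys.length) :
    (pvPref ys).getD i 0 = (ys.take i).sum := by
  unfold pvPref
  rw [pvFoldlPref ys [0] (by simp)]
  cases i with
  | zero => simp
  | succ j =>
      simp only [List.singleton_append, List.getD_cons_succ,
        show ([(0:Int)].getLastD 0) = 0 from rfl]
      rw [pvScan_getD ys 0 j (by omega)]
      simp

def pvPw (N x t1 t2 t3 : Int) (n : Int) : Int :=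
  if n < t1 then N - x + n else if n < t2 then x - n else if n < t3 then n - x else N + x - n

theorem pvCost_eq_pw (N x n h : Int) (hN : 1 ≤ N) (hh : h * 2 ≤ N ∧ N < (h + 1) * 2) :
    min (min |x - n| (N - x + n)) (N - n + x)
      = pvPw N x (x - h) (x + 1) (x + h + 1) n := by
  unfold pvPw
  rcases abs_cases (x - n) with ⟨h1, h2⟩ | ⟨h1, h2⟩ <;> rw [h1] <;>
    simp only [min_def] <;> split_ifs <;> omega

theorem pvPwSum (N x t1 t2 t3 : Int) (h12 : t1 ≤ t2) (h23 : t2 ≤ t3) (l : List Int) :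
    (l.map (pvPw N x t1 t2 t3)).sum
      = (N - x) * ((l.countP (fun n => n < t1) : Int)) + (l.filter (fun n => n < t1)).sum
        + (x * ((l.countP (fun n => n < t2) : Int) - (l.countP (fun n => n < t1) : Int))
            - ((l.filter (fun n => n < t2)).sum - (l.filter (fun n => n < t1)).sum))
        + (((l.filter (fun n => n < t3)).sum - (l.filter (fun n => n < t2)).sum)
            - x * ((l.countP (fun n => n < t3) : Int) - (l.countP (fun n => n < t2) : Int)))
        + ((N + x) * ((l.length : Int) - (l.countP (fun n => n < t3) : Int))
            - (l.sum - (l.filter (fun n => n < t3)).sum)) := by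
  induction l with
  | nil => simp
  | cons n l ih =>
      simp only [List.map_cons, List.sum_cons, List.countP_cons, List.filter_cons,
        List.length_cons, List.sum_cons, ih, pvPw]
      by_cases hn1 : n < t1 <;> by_cases hn2 : n < t2 <;> by_cases hn3 : n < t3 <;>
        simp only [hn1, hn2, hn3, decide_true, decide_false, if_true, if_false,
          List.sum_cons] <;> first | (exfalso; omega) | (push_cast; ring)

-- counts/segment sums read off from the binary search on the sorted list
theorem pvBl_count_sum (nums : List Int) (t : Int) :
    (pvBlLoop (PySem.List.sorted nums (fun n => n) false) t 0
        (PySem.List.sorted nums (fun n => n) false).length : Int)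
      = ((PySem.List.sorted nums (fun n => n) false).countP (fun n => n < t) : Int)
    ∧ (pvPref (PySem.List.sorted nums (fun n => n) false)).getD
        (pvBlLoop (PySem.List.sorted nums (fun n => n) false) t 0
          (PySem.List.sorted nums (fun n => n) false).length) 0
      = ((PySem.List.sorted nums (fun n => n) false).filter (fun n => n < t)).sum := by
  set ys := PySem.List.sorted nums (fun n => n) false with hys
  have mono : ∀ p q : Nat, p ≤ q → q < ys.length → ys.getD p 0 ≤ ys.getD q 0 := by
    intro p q hpq hq
    rw [List.getD_eq_getElem ys 0 (by omega), List.getD_eq_getElem ys 0 hq]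
    exact PySem.List.sorted_id_getElem_mono nums hpq hq
  obtain ⟨hle, hlt, hge⟩ := pvBlLoop_spec ys t mono 0 ys.length (Nat.zero_le _) le_rfl
    (by omega) (by omega)
  set r := pvBlLoop ys t 0 ys.length with hr
  have hfilter : ys.filter (fun n => decide (n < t)) = ys.take r := by
    apply pvFilterEqTake ys _ r hle
    · intro j hj; simpa using hlt j hj
    · intro j hj hjl; simpa using not_lt.mpr (hge j hj hjl)
  have hcount : ys.countP (fun n => decide (n < t)) = r := by
    rw [List.countP_eq_length_filter, hfilter, List.length_take]; omega
  refine ⟨by exact_mod_cast hcount.symm, ?_⟩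
  rw [pvPref_getD ys r hle, hfilter]
-- B's prefix-sum/binary-search cost at x equals A's inner scan at x
theorem pvCost_formula (N x : Int) (nums : List Int) (hN : 1 ≤ N) :
    ((N - x) * ((pvBlLoop (PySem.List.sorted nums (fun n => n) false) (x - PySem.Int.floordiv N 2) 0 (PySem.List.sorted nums (fun n => n) false).length : Nat) : Int)
        + (pvPref (PySem.List.sorted nums (fun n => n) false)).getD (pvBlLoop (PySem.List.sorted nums (fun n => n) false) (x - PySem.Int.floordiv N 2) 0 (PySem.List.sorted nums (fun n => n) false).length) 0)
      + (x * (((pvBlLoop (PySem.List.sorted nums (fun n => n) false) (x + 1) 0 (PySem.List.sorted nums (fun n => n) false).length : Nat) : Int) - ((pvBlLoop (PySem.List.sorted nums (fun n => n) false) (x - PySem.Int.floordiv N 2) 0 (PySem.List.sorted nums (fun n => n) false).length : Nat) : Int))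
          - ((pvPref (PySem.List.sorted nums (fun n => n) false)).getD (pvBlLoop (PySem.List.sorted nums (fun n => n) false) (x + 1) 0 (PySem.List.sorted nums (fun n => n) false).length) 0
              - (pvPref (PySem.List.sorted nums (fun n => n) false)).getD (pvBlLoop (PySem.List.sorted nums (fun n => n) false) (x - PySem.Int.floordiv N 2) 0 (PySem.List.sorted nums (fun n => n) false).length) 0))
      + (((pvPref (PySem.List.sorted nums (fun n => n) false)).getD (pvBlLoop (PySem.List.sorted nums (fun n => n) false) (x + PySem.Int.floordiv N 2 + 1) 0 (PySem.List.sorted nums (fun n => n) false).length) 0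
              - (pvPref (PySem.List.sorted nums (fun n => n) false)).getD (pvBlLoop (PySem.List.sorted nums (fun n => n) false) (x + 1) 0 (PySem.List.sorted nums (fun n => n) false).length) 0)
          - x * (((pvBlLoop (PySem.List.sorted nums (fun n => n) false) (x + PySem.Int.floordiv N 2 + 1) 0 (PySem.List.sorted nums (fun n => n) false).length : Nat) : Int) - ((pvBlLoop (PySem.List.sorted nums (fun n => n) false) (x + 1) 0 (PySem.List.sorted nums (fun n => n) false).length : Nat) : Int)))
      + ((N + x) * (((PySem.List.sorted nums (fun n => n) false).length : Int) - ((pvBlLoop (PySem.List.sorted nums (fun n => n) false) (x + PySem.Int.floordiv N 2 + 1) 0 (PySem.List.sorted nums (fun n => n) false).length : Nat) : Int))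
          - ((pvPref (PySem.List.sorted nums (fun n => n) false)).getD (PySem.List.sorted nums (fun n => n) false).length 0
              - (pvPref (PySem.List.sorted nums (fun n => n) false)).getD (pvBlLoop (PySem.List.sorted nums (fun n => n) false) (x + PySem.Int.floordiv N 2 + 1) 0 (PySem.List.sorted nums (fun n => n) false).length) 0))
    = nums.foldl (fun c n => c + min (min |x - n| (N - x + n)) (N - n + x)) 0 := by
  set ys := PySem.List.sorted nums (fun n => n) false with hys
  set h := PySem.Int.floordiv N 2 with hh
  have hflo : h * 2 ≤ N ∧ N < (h + 1) * 2 :=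
    (PySem.Int.floordiv_eq_iff_of_pos (by norm_num)).mp rfl
  have hh0 : 0 ≤ h := by omega
  obtain ⟨hc1, hs1⟩ := pvBl_count_sum nums (x - h)
  obtain ⟨hc2, hs2⟩ := pvBl_count_sum nums (x + 1)
  obtain ⟨hc3, hs3⟩ := pvBl_count_sum nums (x + h + 1)
  have htot : (pvPref ys).getD ys.length 0 = ys.sum := by
    rw [pvPref_getD ys ys.length le_rfl, List.take_length]
  rw [PySem.List.foldl_add nums (fun n => min (min |x - n| (N - x + n)) (N - n + x)) 0]
  have hperm : (ys.map (fun n => min (min |x - n| (N - x + n)) (N - n + x))).Perm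
      (nums.map (fun n => min (min |x - n| (N - x + n)) (N - n + x))) :=
    (PySem.List.sorted_perm nums (fun n => n) false).map _
  rw [← hperm.sum_eq]
  have hmap : ys.map (fun n => min (min |x - n| (N - x + n)) (N - n + x))
      = ys.map (pvPw N x (x - h) (x + 1) (x + h + 1)) := by
    apply List.map_congr_left
    intro n _
    exact pvCost_eq_pw N x n h hN hflo
  rw [hmap, pvPwSum N x (x - h) (x + 1) (x + h + 1) (by omega) (by omega) ys]
  rw [hc1, hc2, hc3, hs1, hs2, hs3, htot]
  ring

-- ===== VERDICT =====
theorem solution_bf_spec : Claim_equal_solution_bf := by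
  intro W N nums _ hpre
  unfold Spec_solution_bf solution_bf solution_bf_alt
  congr 1
  apply List.foldl_ext
  intro m x hx
  simp only []
  have hc := pvCost_formula N x nums hpre
  cases m with
  | none => rw [← hc]
  | some v =>
      rw [← hc]
      simp only [min_def]
      split_ifs <;> simp only [Option.some.injEq] <;> omega
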